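-- pv_equiv track=rewrite | github.com/grtcoder/cs204-riscv_simulator | get_immediate.py | get_immediate
-- ===== SOURCE A (Python) =====
-- def twosCom_binDec(bin, digit):
--         while len(bin)<digit :
--                 bin = '0'+bin
--         if bin[0] == '0':
--                 return int(bin, 2)
--         else:
--                 return -1 * (int(''.join('1' if x == '0' else '0' for x in bin), 2) + 1)
--
-- def get_immediate(machine_code, ins_type):
--     machine_code = list(map(int, machine_code))
--
--     imm = 0
--
--     # if(machine_code[25:32] == beq_op):
--     #     if(machine_code[17:20] == beq_funct3 or machine_code[17:20] == bge_funct3 or machine_code[17:20]==blt_funct3 or machine_code[17:20] == bne_funct3):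
--     #         immt=[0 for x in range(0,13)]
--     #         immt[0]=machine_code[0]#immt[12]
--     #         immt[1]=machine_code[24]#immt[11]
--     #         immt[2:8]=machine_code[1:7]   #[10:5]
--     #         immt[8:12]= machine_code[20:24]#[4:1]
--     #         immt[12]=0
--     #         t23="".join(map(str, immt))
--     #         imm=twosCom_binDec(t23,13)
--     # if(machine_code[25:32] == jal_op):
--     #         immt=[0 for x in range(0,21)]
--     #         immt[0]=machine_code[0]#immt[20]
--     #         immt[9]=machine_code[11]#immt[11]
--     #         immt[1:9]=machine_code[12:20]  #[19:12]
--     #         immt[10:20]= machine_code[1:11]#[10:1]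
--     #         immt[20]=0
--     #         t23="".join(map(str, immt))
--     #         imm=twosCom_binDec(t23,21)
--
--     if ins_type == "I" :
--         tt23="".join(map(str, machine_code[0:12]))
--         tt23=twosCom_binDec(tt23,12)
--         imm = tt23
--
--     if ins_type == "S" :
--         imm_field = machine_code[0:7]
--         for i in range(20, 25) :
--             imm_field.append(machine_code[i])
--         tt23="".join(map(str, imm_field))
--         tt23=twosCom_binDec(tt23,12)
--         imm = tt23
--
--     if ins_type == "SB" : # same as above
--         immt=[0 for x in range(0,13)]
--         immt[0]=machine_code[0]#immt[12]
--         immt[1]=machine_code[24]#immt[11]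
--         immt[2:8]=machine_code[1:7]   #[10:5]
--         immt[8:12]= machine_code[20:24]#[4:1]
--         immt[12]=0
--         t23="".join(map(str, immt))
--         imm=twosCom_binDec(t23,13)
--     # if ins_type == "U" :    NOT NEEDED ?
--
--     if ins_type == "UJ" :    # same as above
--         immt=[0 for x in range(0,21)]
--         immt[0]=machine_code[0]#immt[20]
--         immt[9]=machine_code[11]#immt[11]
--         immt[1:9]=machine_code[12:20]  #[19:12]
--         immt[10:20]= machine_code[1:11]#[10:1]
--         immt[20]=0
--         t23="".join(map(str, immt))
--         imm=twosCom_binDec(t23,21)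
--
--     return imm
-- ===== SOURCE B (Python) =====
-- def get_immediate(machine_code, ins_type):
--     bits = list(map(int, machine_code))
--
--     def field_value(field):
--         v = 0
--         for b in field:
--             v = v * 2 + b
--         return v
--
--     def sign_extend(v, n):
--         return v - 2 ** n if v >= 2 ** (n - 1) else v
--
--     if ins_type == "I":
--         return sign_extend(field_value(bits[0:12]), 12)
--     if ins_type == "S":
--         return sign_extend(field_value(bits[0:7] + bits[20:25]), 12)
--     if ins_type == "SB":
--         f = bits[0:1] + bits[24:25] + bits[1:7] + bits[20:24]
--         return sign_extend(field_value(f) * 2, 13)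
--     if ins_type == "UJ":
--         f = bits[0:1] + bits[12:20] + bits[11:12] + bits[1:11]
--         return sign_extend(field_value(f) * 2, 21)
--     return 0
-- ===== Notes on version B (the rewrite author's own statement) =====
-- stated objective: idiomatic
-- what changed: B assembles each immediate field by slicing the bit list and folding it into an integer with shift-and-add, then sign-extends arithmetically (v - 2**n), instead of A's building a character string from the bits, left-padding it, parsing it with int(s,2) and computing the two's complement by flipping every character of the string.
-- outside the precondition, e.g. on get_immediate([10], 'I'): A returns 2, B returns 10
import Mathlib
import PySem

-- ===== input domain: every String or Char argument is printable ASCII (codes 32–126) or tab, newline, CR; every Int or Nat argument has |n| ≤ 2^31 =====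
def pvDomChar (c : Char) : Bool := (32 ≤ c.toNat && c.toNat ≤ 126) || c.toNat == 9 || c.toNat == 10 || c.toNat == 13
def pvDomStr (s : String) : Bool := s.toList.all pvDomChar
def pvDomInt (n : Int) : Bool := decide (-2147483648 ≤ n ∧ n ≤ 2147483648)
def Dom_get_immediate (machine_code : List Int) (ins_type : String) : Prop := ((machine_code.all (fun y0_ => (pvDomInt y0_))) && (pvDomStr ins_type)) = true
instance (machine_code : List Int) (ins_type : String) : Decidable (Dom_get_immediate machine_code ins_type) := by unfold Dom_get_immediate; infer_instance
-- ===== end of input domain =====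

-- B replaces A's string building / int(s,2) / character-flip two's complement by
-- integer shift-and-add over the sliced bit fields with arithmetic sign extension (idiomatic rewrite).

-- ===== PORT A =====

-- int(s, 2), hand-ported (PySem.Int.ofCharsBase? models it but is opaque to the proofs).
-- Exact for every call A makes: the argument is built by ''.join(map(str, ints)), so its
-- characters are decimal digits and '-'; on the branch where bin[0]=='0' Python's int(s,2)
-- succeeds exactly when every character is '0' or '1' (none = ValueError, excluded by Pre_),
-- and the flipped argument of the other branch consists of '0'/'1' only.
def pvBinDigits? (acc : Int) : List Char → Option Int
  | [] => some acc
  | c :: cs =>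
      if c = '0' then pvBinDigits? (acc * 2) cs
      else if c = '1' then pvBinDigits? (acc * 2 + 1) cs
      else none

def pvIntBase2? (s : List Char) : Option Int :=
  if s = [] then none else pvBinDigits? 0 s

-- while len(bin) < digit: bin = '0' + bin
def pvPad (bin : List Char) (digit : Nat) : List Char :=
  if bin.length < digit then pvPad ('0' :: bin) digit else bin
termination_by digit - bin.length
decreasing_by simp; omega

def twosCom_binDec (bin : List Char) (digit : Nat) : Int :=
  let b := pvPad bin digit
  match b with
  | [] => 0                      -- bin[0] would be an IndexError; unreachable (digit ≥ 12 at every call)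
  | c :: _ =>
    if c = '0' then (pvIntBase2? b).getD 0            -- int(bin, 2); ValueError excluded by Pre_
    else -1 * ((pvIntBase2? (b.map (fun x => if x = '0' then '1' else '0'))).getD 0 + 1)

-- "".join(map(str, l))
def pvJoinStr (l : List Int) : List Char := l.flatMap (fun v => PySem.Int.toChars v)

-- Python slice assignment l[a:b] = new for literal 0 ≤ a ≤ b (clamped), exact
def pvSetSlice (l : List Int) (a b : Nat) (new : List Int) : List Int :=
  l.take a ++ new ++ l.drop b

def get_immediate (machine_code : List Int) (ins_type : String) : Int :=
  let mc := machine_code.map (fun x => x)   -- list(map(int, machine_code)) : identity on ints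
  let imm : Int := 0
  let imm := if ins_type = "I" then
      twosCom_binDec (pvJoinStr (PySem.List.slice mc (some 0) (some 12))) 12
    else imm
  let imm := if ins_type = "S" then
      let imm_field := (PySem.List.pyRange 20 25 1).foldl
        (fun acc i => acc ++ [PySem.List.pyGetD mc i 0])          -- machine_code[i]; IndexError excluded by Pre_
        (PySem.List.slice mc (some 0) (some 7))
      twosCom_binDec (pvJoinStr imm_field) 12
    else imm
  let imm := if ins_type = "SB" then
      let immt := List.replicate 13 (0 : Int)
      let immt := PySem.List.pySetD immt 0 (PySem.List.pyGetD mc 0 0)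
      let immt := PySem.List.pySetD immt 1 (PySem.List.pyGetD mc 24 0)
      let immt := pvSetSlice immt 2 8 (PySem.List.slice mc (some 1) (some 7))
      let immt := pvSetSlice immt 8 12 (PySem.List.slice mc (some 20) (some 24))
      let immt := PySem.List.pySetD immt 12 0
      twosCom_binDec (pvJoinStr immt) 13
    else imm
  let imm := if ins_type = "UJ" then
      let immt := List.replicate 21 (0 : Int)
      let immt := PySem.List.pySetD immt 0 (PySem.List.pyGetD mc 0 0)
      let immt := PySem.List.pySetD immt 9 (PySem.List.pyGetD mc 11 0)
      let immt := pvSetSlice immt 1 9 (PySem.List.slice mc (some 12) (some 20))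
      let immt := pvSetSlice immt 10 20 (PySem.List.slice mc (some 1) (some 11))
      let immt := PySem.List.pySetD immt 20 0
      twosCom_binDec (pvJoinStr immt) 21
    else imm
  imm

-- ===== PORT B =====

def pvFieldValue (field : List Int) : Int := field.foldl (fun v b => v * 2 + b) 0

def pvSignExtend (v : Int) (n : Nat) : Int := if v ≥ 2 ^ (n - 1) then v - 2 ^ n else v

def get_immediate_alt (machine_code : List Int) (ins_type : String) : Int :=
  let bits := machine_code.map (fun x => x)
  if ins_type = "I" then
    pvSignExtend (pvFieldValue (PySem.List.slice bits (some 0) (some 12))) 12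
  else if ins_type = "S" then
    pvSignExtend (pvFieldValue (PySem.List.slice bits (some 0) (some 7)
      ++ PySem.List.slice bits (some 20) (some 25))) 12
  else if ins_type = "SB" then
    pvSignExtend (pvFieldValue (PySem.List.slice bits (some 0) (some 1)
      ++ PySem.List.slice bits (some 24) (some 25)
      ++ PySem.List.slice bits (some 1) (some 7)
      ++ PySem.List.slice bits (some 20) (some 24)) * 2) 13
  else if ins_type = "UJ" then
    pvSignExtend (pvFieldValue (PySem.List.slice bits (some 0) (some 1)
      ++ PySem.List.slice bits (some 12) (some 20)
      ++ PySem.List.slice bits (some 11) (some 12)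
      ++ PySem.List.slice bits (some 1) (some 11)) * 2) 21
  else 0

-- ===== PRECONDITION & SPEC =====

-- Pre_ excludes, for the four recognized ins_types only: lists whose entries are not all 0/1
-- (A then either raises ValueError in int(s,2), or returns an accidental value obtained by
-- concatenating multi-digit decimal representations, e.g. [10] read as binary '10'), and lists
-- too short for A's element accesses (IndexError).  Any other ins_type is unrestricted.
def Pre_get_immediate (machine_code : List Int) (ins_type : String) : Prop :=
  (ins_type = "I" ∨ ins_type = "S" ∨ ins_type = "SB" ∨ ins_type = "UJ") →
    ((∀ b ∈ machine_code, b = 0 ∨ b = 1) ∧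
     ((ins_type = "S" ∨ ins_type = "SB") → 25 ≤ machine_code.length) ∧
     (ins_type = "UJ" → 20 ≤ machine_code.length))
instance (machine_code : List Int) (ins_type : String) : Decidable (Pre_get_immediate machine_code ins_type) := by
  unfold Pre_get_immediate; infer_instance

def pvWitness_get_immediate : List Int × String := ([1, 0, 1, 1, 0, 0, 0, 0, 0, 0, 0, 1], "I")

def Spec_get_immediate (machine_code : List Int) (ins_type : String) (out : Int) : Prop := out = get_immediate_alt machine_code ins_type
instance (machine_code : List Int) (ins_type : String) (out : Int) : Decidable (Spec_get_immediate machine_code ins_type out) := by unfold Spec_get_immediate; infer_instance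

-- ===== CLAIM (what is proved, stated in full; the proofs are below) =====
def Claim_equal_get_immediate : Prop := ∀ (machine_code : List Int) (ins_type : String), Dom_get_immediate machine_code ins_type → Pre_get_immediate machine_code ins_type → Spec_get_immediate machine_code ins_type (get_immediate machine_code ins_type)

-- ===== LEMMAS AND PROOFS =====

-- the character str(b) contributes for a bit b
def pvBitChar (b : Int) : Char := if b = 1 then '1' else '0'

theorem pvJoinStr_bits (l : List Int) (h : ∀ b ∈ l, b = 0 ∨ b = 1) :
    pvJoinStr l = l.map pvBitChar := by
  induction l with
  | nil => rfl
  | cons b t ih =>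
    have ih' := ih (fun x hx => h x (by simp [hx]))
    have h0 : PySem.Int.toChars (0 : Int) = ['0'] := rfl
    have h1 : PySem.Int.toChars (1 : Int) = ['1'] := rfl
    rcases h b (by simp) with rfl | rfl <;>
      simp [pvJoinStr, pvBitChar, List.flatMap_cons, h0, h1] <;>
      simpa [pvJoinStr] using ih'

theorem pvBinDigits?_bits (l : List Int) (acc : Int) (h : ∀ b ∈ l, b = 0 ∨ b = 1) :
    pvBinDigits? acc (l.map pvBitChar) = some (l.foldl (fun v b => v * 2 + b) acc) := by
  induction l generalizing acc with
  | nil => rfl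
  | cons b t ih =>
    rcases h b (by simp) with rfl | rfl
    · simpa [pvBinDigits?, pvBitChar] using ih (acc * 2) (fun x hx => h x (by simp [hx]))
    · simpa [pvBinDigits?, pvBitChar] using ih (acc * 2 + 1) (fun x hx => h x (by simp [hx]))

theorem pvFold_bounds (l : List Int) (acc : Int) (h : ∀ b ∈ l, b = 0 ∨ b = 1) (hacc : 0 ≤ acc) :
    acc * 2 ^ l.length ≤ l.foldl (fun v b => v * 2 + b) acc ∧
    l.foldl (fun v b => v * 2 + b) acc < (acc + 1) * 2 ^ l.length := by
  induction l generalizing acc with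
  | nil => simp
  | cons b t ih =>
    have hb := h b (by simp)
    have hacc' : 0 ≤ acc * 2 + b := by rcases hb with rfl | rfl <;> omega
    obtain ⟨h1, h2⟩ := ih (acc * 2 + b) (fun x hx => h x (by simp [hx])) hacc'
    have hp : (0:Int) < 2 ^ t.length := by positivity
    constructor
    · calc acc * 2 ^ (b :: t).length = acc * 2 * 2 ^ t.length := by
            rw [List.length_cons, pow_succ]; ring
        _ ≤ (acc * 2 + b) * 2 ^ t.length := by
            rcases hb with rfl | rfl <;> nlinarith
        _ ≤ _ := h1
    · calc (b :: t).foldl (fun v b => v * 2 + b) acc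
          = t.foldl (fun v b => v * 2 + b) (acc * 2 + b) := by simp
        _ < (acc * 2 + b + 1) * 2 ^ t.length := h2
        _ ≤ (acc + 1) * 2 ^ (b :: t).length := by
            rw [List.length_cons, pow_succ]
            rcases hb with rfl | rfl <;> nlinarith

theorem pvFold_complement (l : List Int) (acc acc' : Int) :
    (l.map (fun b => 1 - b)).foldl (fun v b => v * 2 + b) acc
      + l.foldl (fun v b => v * 2 + b) acc'
      = (acc + acc' + 1) * 2 ^ l.length - 1 := by
  induction l generalizing acc acc' with
  | nil => simp
  | cons b t ih =>
    simp only [List.map_cons, List.foldl_cons, List.length_cons]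
    rw [ih (acc * 2 + (1 - b)) (acc' * 2 + b)]
    ring

theorem pvPad_eq (bin : List Char) (digit : Nat) :
    pvPad bin digit = List.replicate (digit - bin.length) '0' ++ bin := by
  fun_induction pvPad bin digit with
  | case1 s hlt ih =>
    rw [ih]
    have hstep : digit - s.length = (digit - (('0' :: s).length)) + 1 := by simp; omega
    rw [hstep, List.replicate_succ']
    simp
  | case2 s hge =>
    have h0 : digit - s.length = 0 := by omega
    simp [h0]

theorem pvFold_zeros (k : Nat) (l : List Int) :
    (List.replicate k (0 : Int) ++ l).foldl (fun v b => v * 2 + b) 0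
      = l.foldl (fun v b => v * 2 + b) 0 := by
  induction k with
  | zero => simp
  | succ n ih => simpa [List.replicate_succ] using ih

-- main bridge: A's string two's-complement decoding equals B's arithmetic sign extension
theorem pvMain (l : List Int) (d : Nat) (h : ∀ b ∈ l, b = 0 ∨ b = 1)
    (hlen : l.length ≤ d) (hd : 1 ≤ d) :
    twosCom_binDec (l.map pvBitChar) d = pvSignExtend (pvFieldValue l) d := by
  obtain ⟨b0, t, hsplit⟩ : ∃ b0 t, List.replicate (d - l.length) (0:Int) ++ l = b0 :: t := by
    cases hC : List.replicate (d - l.length) (0:Int) ++ l with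
    | nil =>
      exfalso
      have hc : (List.replicate (d - l.length) (0:Int) ++ l).length = 0 := by rw [hC]; rfl
      rw [List.length_append, List.length_replicate] at hc
      omega
    | cons x xs => exact ⟨x, xs, rfl⟩
  have hbits' : ∀ b ∈ b0 :: t, b = 0 ∨ b = 1 := by
    rw [← hsplit]
    intro b hb
    rcases List.mem_append.1 hb with hb | hb
    · exact Or.inl (List.eq_of_mem_replicate hb)
    · exact h b hb
  have hlen' : t.length + 1 = d := by
    have hc := congrArg List.length hsplit
    simp at hc
    omega
  have hpad : pvPad (l.map pvBitChar) d = (b0 :: t).map pvBitChar := by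
    rw [pvPad_eq, List.length_map, ← hsplit]
    simp [List.map_append, List.map_replicate, pvBitChar]
  have hval : pvFieldValue (b0 :: t) = pvFieldValue l := by
    rw [← hsplit]
    exact pvFold_zeros _ _
  have htb : ∀ b ∈ t, b = 0 ∨ b = 1 := fun b hb => hbits' b (by simp [hb])
  have hpow : (0:Int) < 2 ^ t.length := by positivity
  rw [twosCom_binDec]
  simp only [hpad, List.map_cons]
  rcases hbits' b0 (by simp) with rfl | rfl
  · -- leading bit 0: both sides are the plain value
    simp only [show pvBitChar (0:Int) = '0' from rfl, reduceIte]
    rw [show ('0' : Char) :: t.map pvBitChar = ((0:Int) :: t).map pvBitChar from by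
      simp [pvBitChar]]
    rw [pvIntBase2?, if_neg (by simp), pvBinDigits?_bits _ _ hbits']
    have hub := (pvFold_bounds t 0 htb le_rfl).2
    have hde : d - 1 = t.length := by omega
    rw [← hval]
    simp only [pvSignExtend, Option.getD_some, pvFieldValue, List.foldl_cons]
    rw [if_neg (by rw [ge_iff_le, not_le, hde]; simpa using hub)]
  · -- leading bit 1: string two's complement vs arithmetic sign extension
    simp only [show pvBitChar (1:Int) = '1' from rfl, Char.reduceEq, reduceIte]
    have hflip : ('0':Char) :: (t.map pvBitChar).map (fun x => if x = '0' then '1' else '0')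
        = (((1:Int) :: t).map (fun b => 1 - b)).map pvBitChar := by
      simp only [List.map_cons, List.map_map]
      refine List.cons_eq_cons.mpr ⟨by norm_num [pvBitChar], ?_⟩
      exact List.map_congr_left (fun b hb => by rcases htb b hb with rfl | rfl <;> rfl)
    have hbitsflip : ∀ b ∈ ((1:Int) :: t).map (fun b => 1 - b), b = 0 ∨ b = 1 := by
      intro b hb
      simp only [List.mem_map] at hb
      obtain ⟨a, ha, rfl⟩ := hb
      rcases hbits' a ha with rfl | rfl <;> norm_num
    rw [hflip, pvIntBase2?, if_neg (by simp), pvBinDigits?_bits _ _ hbitsflip]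
    have hcomp := pvFold_complement ((1:Int) :: t) 0 0
    have hlb := (pvFold_bounds t 1 htb (by norm_num)).1
    rw [← hval]
    simp only [pvSignExtend, Option.getD_some, pvFieldValue, List.foldl_cons] at hcomp hlb ⊢
    rw [if_pos]
    · have hde : (1 :: t).length = d := by simp; omega
      rw [hde] at hcomp
      omega
    · have hde : d - 1 = t.length := by omega
      rw [hde]
      simp at hlb ⊢
      omega

theorem pvFieldValue_append_zero (f : List Int) :
    pvFieldValue (f ++ [0]) = pvFieldValue f * 2 := by
  simp [pvFieldValue, List.foldl_append]

-- ===== VERDICT (by name: the statement is the Claim_ definition above) =====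
set_option maxHeartbeats 2000000 in
theorem get_immediate_spec : Claim_equal_get_immediate := by
  intro mc t hdom hpre
  unfold Spec_get_immediate get_immediate get_immediate_alt
  simp only [List.map_id']
  by_cases hI : t = "I"
  · subst hI
    obtain ⟨hb, -, -⟩ := hpre (Or.inl rfl)
    simp only [String.reduceEq, reduceIte]
    have hsl : PySem.List.slice mc (some 0) (some 12) = mc.take 12 := by
      simp [pysem]
    have hbT : ∀ b ∈ mc.take 12, b = 0 ∨ b = 1 := fun b hbm => hb b (List.mem_of_mem_take hbm)
    rw [hsl, pvJoinStr_bits _ hbT]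
    exact pvMain _ 12 hbT (by simp) (by norm_num)
  · by_cases hS : t = "S"
    · subst hS
      obtain ⟨hb, hl, -⟩ := hpre (Or.inr (Or.inl rfl))
      have hlen := hl (Or.inl rfl)
      simp only [String.reduceEq, reduceIte]
      rcases mc with _|⟨a0, _|⟨a1, _|⟨a2, _|⟨a3, _|⟨a4, _|⟨a5, _|⟨a6, _|⟨a7, _|⟨a8, _|⟨a9, _|⟨a10, _|⟨a11, _|⟨a12, _|⟨a13, _|⟨a14, _|⟨a15, _|⟨a16, _|⟨a17, _|⟨a18, _|⟨a19, _|⟨a20, _|⟨a21, _|⟨a22, _|⟨a23, _|⟨a24, rest⟩⟩⟩⟩⟩⟩⟩⟩⟩⟩⟩⟩⟩⟩⟩⟩⟩⟩⟩⟩⟩⟩⟩⟩⟩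
      all_goals try (exfalso; revert hlen; simp; done)
      rw [PySem.List.foldl_append_singleton_eq_map]
      rw [show PySem.List.pyRange 20 25 1 = [20, 21, 22, 23, 24] from by decide]
      simp only [List.map_cons, List.map_nil, PySem.List.pyGetD_ofNat']
      have hbF : ∀ b ∈ ([a0, a1, a2, a3, a4, a5, a6, a20, a21, a22, a23, a24] : List Int),
          b = 0 ∨ b = 1 := by
        intro b hbm
        simp only [List.mem_cons, List.not_mem_nil, or_false] at hbm
        rcases hbm with rfl|rfl|rfl|rfl|rfl|rfl|rfl|rfl|rfl|rfl|rfl|rfl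
        all_goals exact hb _ (by simp)
      exact (show twosCom_binDec (pvJoinStr [a0, a1, a2, a3, a4, a5, a6, a20, a21, a22, a23, a24]) 12
          = pvSignExtend (pvFieldValue [a0, a1, a2, a3, a4, a5, a6, a20, a21, a22, a23, a24]) 12 from by
        rw [pvJoinStr_bits _ hbF]
        exact pvMain _ 12 hbF (by simp) (by norm_num))
    · by_cases hSB : t = "SB"
      · subst hSB
        obtain ⟨hb, hl, -⟩ := hpre (Or.inr (Or.inr (Or.inl rfl)))
        have hlen := hl (Or.inr rfl)
        simp only [String.reduceEq, reduceIte]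
        rcases mc with _|⟨a0, _|⟨a1, _|⟨a2, _|⟨a3, _|⟨a4, _|⟨a5, _|⟨a6, _|⟨a7, _|⟨a8, _|⟨a9, _|⟨a10, _|⟨a11, _|⟨a12, _|⟨a13, _|⟨a14, _|⟨a15, _|⟨a16, _|⟨a17, _|⟨a18, _|⟨a19, _|⟨a20, _|⟨a21, _|⟨a22, _|⟨a23, _|⟨a24, rest⟩⟩⟩⟩⟩⟩⟩⟩⟩⟩⟩⟩⟩⟩⟩⟩⟩⟩⟩⟩⟩⟩⟩⟩⟩
        all_goals try (exfalso; revert hlen; simp; done)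
        simp only [PySem.List.pyGetD_ofNat']
        have hbF : ∀ b ∈ (([a0, a24, a1, a2, a3, a4, a5, a6, a20, a21, a22, a23] : List Int) ++ [0]),
            b = 0 ∨ b = 1 := by
          intro b hbm
          simp only [List.mem_append, List.mem_cons, List.not_mem_nil, or_false] at hbm
          rcases hbm with (rfl|rfl|rfl|rfl|rfl|rfl|rfl|rfl|rfl|rfl|rfl|rfl)|rfl
          all_goals first | (exact Or.inl rfl) | exact hb _ (by simp)
        exact (show twosCom_binDec (pvJoinStr (([a0, a24, a1, a2, a3, a4, a5, a6, a20, a21, a22, a23] : List Int) ++ [0])) 13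
            = pvSignExtend (pvFieldValue ([a0, a24, a1, a2, a3, a4, a5, a6, a20, a21, a22, a23] : List Int) * 2) 13 from by
          rw [← pvFieldValue_append_zero, pvJoinStr_bits _ hbF]
          exact pvMain _ 13 hbF (by simp) (by norm_num))
      · by_cases hUJ : t = "UJ"
        · subst hUJ
          obtain ⟨hb, -, hl⟩ := hpre (Or.inr (Or.inr (Or.inr rfl)))
          have hlen := hl rfl
          simp only [String.reduceEq, reduceIte]
          rcases mc with _|⟨a0, _|⟨a1, _|⟨a2, _|⟨a3, _|⟨a4, _|⟨a5, _|⟨a6, _|⟨a7, _|⟨a8, _|⟨a9, _|⟨a10, _|⟨a11, _|⟨a12, _|⟨a13, _|⟨a14, _|⟨a15, _|⟨a16, _|⟨a17, _|⟨a18, _|⟨a19, rest⟩⟩⟩⟩⟩⟩⟩⟩⟩⟩⟩⟩⟩⟩⟩⟩⟩⟩⟩⟩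
          all_goals try (exfalso; revert hlen; simp; done)
          simp only [PySem.List.pyGetD_ofNat']
          have hbF : ∀ b ∈ (([a0, a12, a13, a14, a15, a16, a17, a18, a19, a11, a1, a2, a3, a4, a5, a6, a7, a8, a9, a10] : List Int) ++ [0]), b = 0 ∨ b = 1 := by
            intro b hbm
            simp only [List.mem_append, List.mem_cons, List.not_mem_nil, or_false] at hbm
            rcases hbm with (rfl|rfl|rfl|rfl|rfl|rfl|rfl|rfl|rfl|rfl|rfl|rfl|rfl|rfl|rfl|rfl|rfl|rfl|rfl|rfl)|rfl
            all_goals first | (exact Or.inl rfl) | exact hb _ (by simp)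
          exact (show twosCom_binDec (pvJoinStr (([a0, a12, a13, a14, a15, a16, a17, a18, a19, a11, a1, a2, a3, a4, a5, a6, a7, a8, a9, a10] : List Int) ++ [0])) 21
              = pvSignExtend (pvFieldValue ([a0, a12, a13, a14, a15, a16, a17, a18, a19, a11, a1, a2, a3, a4, a5, a6, a7, a8, a9, a10] : List Int) * 2) 21 from by
            rw [← pvFieldValue_append_zero, pvJoinStr_bits _ hbF]
            exact pvMain _ 21 hbF (by simp) (by norm_num))
        · simp only [if_neg hI, if_neg hS, if_neg hSB, if_neg hUJ]
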